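-- pv_equiv track=rewrite | github.com/AstraKlaus/Python | Инженерный калькулятор Касьянов ИТ-112.py | translate_black_to_2
-- ===== SOURCE A (Python) =====
-- def translate_cell_10(one_num, ss):
--     new_one_num = 0
--     i = 0
--     while one_num != 0:
--         new_one_num += one_num % 10 * ss ** i
--         i += 1
--         one_num //= 10
--     return new_one_num
--
-- def translate_cell_10_to(one_num, ss):
--     new_one_num = ''
--     while one_num != 0:
--         new_one_num = str(one_num % ss) + new_one_num
--         one_num //= ss
--     return new_one_num
--
-- def translate_black_to_2(just_num, ss):
--     cell_num = translate_cell_10(just_num, ss)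
--     bin_num = translate_cell_10_to(cell_num, 2)
--     new_bin_num = ''
--     for i in range(len(str(bin_num))):
--         if str(bin_num)[i] == '1':
--             new_bin_num += '0'
--         else:
--             new_bin_num += '1'
--     return '1' + new_bin_num
-- ===== SOURCE B (Python) =====
-- def _reinterpret(n, ss):
--     # Horner form of the digit reinterpretation: n's decimal digits read in base ss
--     if n == 0:
--         return 0
--     return _reinterpret(n // 10, ss) * ss + n % 10
--
--
-- def _bits(length, m):
--     # exactly `length` binary digits of m, most significant first
--     if length == 0:
--         return ''
--     return _bits(length - 1, m >> 1) + ('1' if m & 1 else '0')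
--
--
-- def translate_black_to_2(just_num, ss):
--     cell_num = _reinterpret(just_num, ss)
--     length = cell_num.bit_length()
--     inverted = ((1 << length) - 1) ^ cell_num
--     return '1' + _bits(length, inverted)
-- ===== Notes on version B (the rewrite author's own statement) =====
-- stated objective: alternative
-- what changed: B computes the digit reinterpretation in Horner form instead of A's accumulator loop with explicit powers ss**i, and replaces A's binary-string building plus per-character flip loop with direct integer bit arithmetic: bit_length, a full-width mask xor, and one fixed-width binary rendering.
-- outside the precondition, e.g. on translate_black_to_2(5, -3): A returns '1010', B returns '1010'; on translate_black_to_2(10, -2): A does not finish within the time limit, B returns '101'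
import Mathlib
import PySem

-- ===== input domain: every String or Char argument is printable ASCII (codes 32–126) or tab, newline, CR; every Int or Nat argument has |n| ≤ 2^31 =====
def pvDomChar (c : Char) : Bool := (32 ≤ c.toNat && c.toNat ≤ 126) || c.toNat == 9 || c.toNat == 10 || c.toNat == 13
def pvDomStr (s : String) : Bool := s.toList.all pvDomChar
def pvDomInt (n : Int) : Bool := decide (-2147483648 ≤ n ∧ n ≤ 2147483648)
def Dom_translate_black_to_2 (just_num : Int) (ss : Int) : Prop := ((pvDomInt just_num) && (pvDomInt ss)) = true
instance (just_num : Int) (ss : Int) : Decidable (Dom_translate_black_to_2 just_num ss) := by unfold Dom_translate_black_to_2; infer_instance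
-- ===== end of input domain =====

-- B replaces A's binary-string building and per-character flip loop with integer bit arithmetic
-- (bit_length, shift, xor) and computes the digit reinterpretation in Horner form (alternative
-- decomposition; equivalence proved on Pre_: 0 ≤ just_num ∧ 0 ≤ ss).

-- ===== PORT A =====

-- 'while one_num != 0: new += one_num % 10 * ss ** i; i += 1; one_num //= 10'
-- (for one_num < 0 the Python loop never terminates — outside Pre_;
--  the guard 'one_num ≤ 0' only makes the recursion total there)
def tc10_loop (one_num ss acc : Int) (i : Nat) : Int :=
  if one_num ≤ 0 then acc
  else tc10_loop (PySem.Int.floordiv one_num 10) ss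
         (acc + PySem.Int.mod one_num 10 * ss ^ i) (i + 1)
termination_by one_num.toNat
decreasing_by simp only [PySem.Int.floordiv_eq_ediv_of_pos (by omega : (0:Int) < 10)]; omega

def translate_cell_10 (one_num ss : Int) : Int := tc10_loop one_num ss 0 0

-- 'while one_num != 0: new = str(one_num % ss) + new; one_num //= ss'
-- (A calls this only with ss = 2; for one_num < 0 or ss ≤ 1 the Python loop never
--  terminates resp. raises — outside Pre_; the guard only makes the recursion total)
def tcto_loop (one_num ss : Int) (acc : List Char) : List Char :=
  if one_num ≤ 0 ∨ ss ≤ 1 then acc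
  else tcto_loop (PySem.Int.floordiv one_num ss) ss
         (PySem.Int.toChars (PySem.Int.mod one_num ss) ++ acc)
termination_by one_num.toNat
decreasing_by
  rename_i h
  rw [PySem.Int.floordiv_eq_ediv_of_pos (by omega)]
  have hq0 : 0 ≤ one_num / ss := Int.ediv_nonneg (by omega) (by omega)
  have hn : 0 < one_num := by omega
  have key : ss * (one_num / ss) + one_num % ss = one_num := Int.mul_ediv_add_emod one_num ss
  have hr : 0 ≤ one_num % ss := Int.emod_nonneg one_num (by omega)
  have h2q : 2 * (one_num / ss) ≤ ss * (one_num / ss) :=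
    mul_le_mul_of_nonneg_right (by omega : (2:Int) ≤ ss) hq0
  have hlt : one_num / ss < one_num := by linarith
  exact (Int.toNat_lt_toNat (by omega)).mpr hlt

def translate_cell_10_to (one_num ss : Int) : List Char := tcto_loop one_num ss []

-- 'for i in range(len(str(bin_num))): …' reads str(bin_num)[i] for every index in order:
-- ported as a left fold over the characters of bin_num (exact: same characters, same order)
def translate_black_to_2 (just_num : Int) (ss : Int) : String :=
  let cell_num := translate_cell_10 just_num ss
  let bin_num := translate_cell_10_to cell_num 2
  let new_bin_num := bin_num.foldl
    (fun acc c => if c = '1' then acc ++ ['0'] else acc ++ ['1']) []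
  String.ofList ('1' :: new_bin_num)

-- ===== PORT B =====

-- '_reinterpret(n, ss)': Horner recursion on the decimal digits
-- (Python recurses while n != 0; for n < 0 it never terminates — outside Pre_;
--  the guard 'n ≤ 0' only makes the recursion total)
def reinterpret (n ss : Int) : Int :=
  if n ≤ 0 then 0
  else reinterpret (PySem.Int.floordiv n 10) ss * ss + PySem.Int.mod n 10
termination_by n.toNat
decreasing_by simp only [PySem.Int.floordiv_eq_ediv_of_pos (by omega : (0:Int) < 10)]; omega

-- '_bits(length, m)': exactly `length` binary digits of m, most significant first
def bitsChars : Nat → Int → List Char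
  | 0, _ => []
  | l + 1, m => bitsChars l (m >>> (1 : Nat)) ++ [if PySem.Int.band m 1 ≠ 0 then '1' else '0']

def translate_black_to_2_alt (just_num : Int) (ss : Int) : String :=
  let cell_num := reinterpret just_num ss
  let length := PySem.Int.bitLength cell_num
  let inverted := PySem.Int.bxor ((1 <<< length) - 1) cell_num
  String.ofList ('1' :: bitsChars length inverted)

-- ===== PRECONDITION & SPEC =====
-- Pre_ excludes negative just_num, on which A's decimal while-loop never terminates, and all
-- negative ss: there A's base-2 while-loop runs forever exactly when the reinterpreted value is
-- negative, which depends on the digit pattern and not on a closed-form input shape, so the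
-- whole ss < 0 half-plane is excluded although A still returns on part of it (see claim cites).
def Pre_translate_black_to_2 (just_num : Int) (ss : Int) : Prop :=
  0 ≤ just_num ∧ 0 ≤ ss
instance (just_num : Int) (ss : Int) : Decidable (Pre_translate_black_to_2 just_num ss) := by
  unfold Pre_translate_black_to_2; infer_instance

def pvWitness_translate_black_to_2 : Int × Int := (13, 3)

def Spec_translate_black_to_2 (just_num : Int) (ss : Int) (out : String) : Prop := out = translate_black_to_2_alt just_num ss
instance (just_num : Int) (ss : Int) (out : String) : Decidable (Spec_translate_black_to_2 just_num ss out) := by unfold Spec_translate_black_to_2; infer_instance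

-- ===== CLAIM (what is proved, stated in full; the proofs are below) =====
def Claim_equal_translate_black_to_2 : Prop := ∀ (just_num : Int) (ss : Int), Dom_translate_black_to_2 just_num ss → Pre_translate_black_to_2 just_num ss → Spec_translate_black_to_2 just_num ss (translate_black_to_2 just_num ss)

-- ===== LEMMAS AND PROOFS =====

-- A's accumulator loop computes acc + ss^i * (Horner value)
theorem tc10_loop_eq (ss one_num acc : Int) (i : Nat) :
    tc10_loop one_num ss acc i = acc + ss ^ i * reinterpret one_num ss := by
  induction one_num, acc, i using tc10_loop.induct ss with
  | case1 one_num acc i h =>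
    rw [tc10_loop, if_pos h, reinterpret, if_pos h]; ring
  | case2 one_num acc i h ih =>
    rw [tc10_loop, if_neg h, reinterpret, if_neg h, ih]; ring

theorem reinterpret_nonneg (n ss : Int) (hss : 0 ≤ ss) : 0 ≤ reinterpret n ss := by
  induction n using reinterpret.induct with
  | case1 n h => rw [reinterpret, if_pos h]
  | case2 n h ih =>
    rw [reinterpret, if_neg h]
    have h1 := PySem.Int.mod_nonneg n (show (0:Int) < 10 by omega)
    positivity

-- the characters A's base-2 loop produces, as a pure spec on Nat
def specBits (m : Nat) : List Char :=
  if m = 0 then [] else specBits (m / 2) ++ [if m % 2 = 1 then '1' else '0']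
termination_by m
decreasing_by omega

theorem tcto_loop_eq (c : Int) (acc : List Char) (hc : 0 ≤ c) :
    tcto_loop c 2 acc = specBits c.toNat ++ acc := by
  induction hm : c.toNat using Nat.strong_induction_on generalizing c acc with
  | _ m ih =>
  by_cases h0 : c ≤ 0
  · rw [tcto_loop, if_pos (Or.inl h0), show m = 0 by omega, specBits]
    simp
  · rw [tcto_loop, if_neg (by omega),
        PySem.Int.floordiv_eq_ediv_of_pos (show (0:Int) < 2 by omega),
        PySem.Int.mod_eq_emod_of_pos (show (0:Int) < 2 by omega),
        ih (c / 2).toNat (by omega) _ _ (by omega) rfl]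
    conv_rhs => rw [specBits]
    rw [if_neg (show ¬ m = 0 by omega)]
    have hchar : PySem.Int.toChars (c % 2) = [if m % 2 = 1 then '1' else '0'] := by
      have h01 : c % 2 = 0 ∨ c % 2 = 1 := by omega
      rcases h01 with h | h <;>
        simp only [show m % 2 = (c % 2).toNat from by omega, h] <;> decide
    rw [hchar, show (c / 2).toNat = m / 2 from by omega]
    simp

-- flipping each of A's bit-characters yields B's rendering of the xor-complement
theorem flip_specBits (m : Nat) :
    (specBits m).map (fun c => if c = '1' then '0' else '1') =
      bitsChars (PySem.Int.bitLength (m : Int))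
        (PySem.Int.bxor ((1 <<< PySem.Int.bitLength (m : Int)) - 1) (m : Int)) := by
  induction m using Nat.strong_induction_on with
  | _ m ih =>
  by_cases h0 : m = 0
  · subst h0
    rw [specBits]
    simp [bitsChars]
  · have h2L : (1:Nat) ≤ 2 ^ PySem.Int.bitLength ((m / 2 : Nat) : Int) := Nat.one_le_two_pow
    set L : Nat := PySem.Int.bitLength ((m / 2 : Nat) : Int) with hLdef
    have hL : PySem.Int.bitLength (m : Int) = L + 1 := PySem.Int.bitLength_natCast (by omega)
    have hpow : (2:Nat) ^ (L + 1) = 2 * 2 ^ L := by ring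
    have hmaskS : ((1 <<< (L + 1) : Nat) : Int) - 1 = ((2 ^ (L + 1) - 1 : Nat) : Int) := by
      have h1 : (1:Nat) ≤ 2 ^ (L + 1) := Nat.one_le_two_pow
      rw [Nat.shiftLeft_eq, one_mul]; omega
    have hmask : ((1 <<< L : Nat) : Int) - 1 = ((2 ^ L - 1 : Nat) : Int) := by
      rw [Nat.shiftLeft_eq, one_mul]; omega
    conv_lhs => rw [specBits]
    rw [if_neg h0, List.map_append, ih (m / 2) (by omega), hL, bitsChars,
        hmaskS, hmask, PySem.Int.bxor_natCast, PySem.Int.bxor_natCast,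
        List.map_cons, List.map_nil]
    have eshift : ((((2 ^ (L + 1) - 1) ^^^ m : Nat)) : Int) >>> (1 : Nat) =
        ((((2 ^ L - 1) ^^^ (m / 2) : Nat)) : Int) := by
      rw [← Int.natCast_shiftRight, Nat.shiftRight_xor_distrib]
      congr 2
      rw [Nat.shiftRight_one]; omega
    have hx2 : ((2 ^ (L + 1) - 1) ^^^ m) % 2 = (1 + m % 2) % 2 := by
      rw [Nat.xor_mod_two_eq]; omega
    have echar : (if (if m % 2 = 1 then '1' else '0') = '1' then '0' else '1') =
        (if PySem.Int.band ((((2 ^ (L + 1) - 1) ^^^ m : Nat)) : Int) 1 ≠ 0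
         then '1' else '0') := by
      have hmodc : PySem.Int.mod ((((2 ^ (L + 1) - 1) ^^^ m : Nat)) : Int) 2 =
          (((((2 ^ (L + 1) - 1) ^^^ m) % 2 : Nat)) : Int) := by
        exact_mod_cast PySem.Int.mod_natCast _ 2
      rw [PySem.Int.band_one, hmodc, hx2]
      have h01 : m % 2 = 0 ∨ m % 2 = 1 := by omega
      rcases h01 with h | h <;> rw [h] <;> decide
    rw [eshift, echar]

-- ===== VERDICT (by name: the statement is the Claim_ definition above) =====
theorem translate_black_to_2_spec : Claim_equal_translate_black_to_2 := by
  intro just_num ss _ hpre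
  obtain ⟨hj, hs⟩ := hpre
  have hcell : translate_cell_10 just_num ss = reinterpret just_num ss := by
    rw [translate_cell_10, tc10_loop_eq]; ring
  unfold Spec_translate_black_to_2
  simp only [translate_black_to_2, translate_black_to_2_alt, hcell]
  set c := reinterpret just_num ss with hc
  have hc0 : 0 ≤ c := reinterpret_nonneg _ _ hs
  have hbin : translate_cell_10_to c 2 = specBits c.toNat := by
    rw [translate_cell_10_to, tcto_loop_eq c [] hc0, List.append_nil]
  rw [hbin]
  have hfold : (specBits c.toNat).foldl
      (fun acc ch => if ch = '1' then acc ++ ['0'] else acc ++ ['1']) [] =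
      (specBits c.toNat).map (fun ch => if ch = '1' then '0' else '1') := by
    have h1 : (specBits c.toNat).foldl
        (fun acc ch => if ch = '1' then acc ++ ['0'] else acc ++ ['1']) [] =
        (specBits c.toNat).foldl (fun acc ch => acc ++ [if ch = '1' then '0' else '1']) [] := by
      apply PySem.List.foldl_congr_mem
      intro acc x hx
      split <;> rfl
    rw [h1, PySem.List.foldl_append_singleton_eq_map, List.nil_append]
  rw [hfold, flip_specBits c.toNat, Int.toNat_of_nonneg hc0]
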